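-- pv_equiv track=rewrite | github.com/WowAll/Baekjoon | 백준/Silver/10819. 차이를 최대로/차이를 최대로.py | diff_max
-- ===== SOURCE A (Python) =====
-- def sum_diff(arr):
--     sum = 0
--     for i in range(len(arr) - 1):
--         sum += abs(arr[i] - arr[i + 1])
--     return sum
--
-- def diff_max(arr, vis, order, cnt):
--     ans = 0
--     if cnt == len(arr):
--         return sum_diff(order)
--     for i in range(len(arr)):
--         if not vis[i]:
--             vis[i] = True
--             order.append(arr[i])
--             ans = max(ans, diff_max(arr, vis, order, cnt + 1))
--             order.pop()
--             vis[i] = False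
--
--     return ans
-- ===== SOURCE B (Python) =====
-- def diff_max(arr, vis, order, cnt):
--     n = len(arr)
--     if cnt == n:
--         return sum(abs(x - y) for x, y in zip(order, order[1:]))
--     vals = [a for a, v in zip(arr, vis) if not v]
--     k = n - cnt
--     if k < 0 or k > len(vals):
--         return 0
--     base = sum(abs(x - y) for x, y in zip(order, order[1:]))
--     tail = order[-1] if order else None
--     return base + _best(tail, vals, k)
--
-- def _best(tail, vals, k):
--     # max total of the chain tail -> (k picked values, each used once), 0 when k == 0
--     if k == 0:
--         return 0
--     best = 0
--     for i, v in enumerate(vals):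
--         cand = (0 if tail is None else abs(tail - v)) + _best(v, vals[:i] + vals[i + 1:], k - 1)
--         if cand > best:
--             best = cand
--     return best
-- ===== Notes on version B (the rewrite author's own statement) =====
-- stated objective: alternative
-- what changed: A backtracks over indices with a shared mutable vis/order and re-sums the whole order list at every leaf; B extracts the free values once and recurses purely on (last value, remaining values, slots left), accumulating each |difference| incrementally, and answers dead inputs (too few free slots) directly with 0 instead of exhausting the recursion tree.
import Mathlib
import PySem

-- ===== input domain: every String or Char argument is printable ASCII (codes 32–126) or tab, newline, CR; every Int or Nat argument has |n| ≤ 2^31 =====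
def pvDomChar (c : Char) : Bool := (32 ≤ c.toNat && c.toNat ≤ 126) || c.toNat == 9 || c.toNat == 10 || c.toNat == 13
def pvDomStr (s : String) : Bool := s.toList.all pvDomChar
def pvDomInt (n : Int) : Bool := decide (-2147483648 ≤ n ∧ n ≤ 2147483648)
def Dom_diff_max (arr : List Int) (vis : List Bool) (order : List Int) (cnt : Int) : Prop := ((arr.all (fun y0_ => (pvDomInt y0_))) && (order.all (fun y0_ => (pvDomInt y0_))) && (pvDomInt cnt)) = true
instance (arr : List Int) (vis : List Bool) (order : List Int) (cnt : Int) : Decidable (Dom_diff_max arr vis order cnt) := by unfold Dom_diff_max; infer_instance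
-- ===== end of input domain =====

-- B re-implements A's factorial search without the mutable vis/order state and without the per-leaf
-- re-summation: it recurses on (last value, remaining free values, slots left), adding each
-- |difference| as it is committed, and answers dead inputs (too few free slots) directly with 0.
-- A temporarily mutates vis and order but always restores them before returning, so the ports
-- model both functions as pure; the equivalence is about the return value.
-- Both ports carry a structural fuel argument as a totality guard only: each recursive call marks
-- one more entry visited (A) / removes one value (B), so the supplied fuel is never exhausted.

-- ===== PORT A =====
def sumDiffA (arr : List Int) : Int :=
  (PySem.List.pyRange 0 ((arr.length : Int) - 1) 1).foldl
    (fun s i => s + |PySem.List.pyGetD arr i 0 - PySem.List.pyGetD arr (i + 1) 0|) 0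

def diffGo : Nat → List Int → List Bool → List Int → Int → Int
  | 0, _, _, _, _ => 0   -- fuel exhausted: never reached (each level visits one more entry)
  | fuel + 1, arr, vis, order, cnt =>
    if cnt = (arr.length : Int) then sumDiffA order
    else (List.range arr.length).foldl
      (fun ans (i : Nat) =>
        if PySem.List.pyGet? vis ((i : Int)) = some false then
          max ans (diffGo fuel arr (vis.set i true) (order ++ [arr[i]!]) (cnt + 1))
        else ans) 0

def diff_max (arr : List Int) (vis : List Bool) (order : List Int) (cnt : Int) : Int :=
  diffGo (vis.count false + 1) arr vis order cnt

-- ===== PORT B =====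
-- sum(abs(x - y) for x, y in zip(order, order[1:]))  (order[1:] = drop 1, PySem.List.slice_from_natCast)
def zipSumB (order : List Int) : Int :=
  (order.zip (order.drop 1)).foldl (fun s p => s + |p.1 - p.2|) 0

-- [a for a, v in zip(arr, vis) if not v]
def freeValsB (arr : List Int) (vis : List Bool) : List Int :=
  (arr.zip vis).filterMap (fun p => if p.2 then none else some p.1)

-- 0 if tail is None else abs(tail - v)
def edgeB (tail : Option Int) (v : Int) : Int :=
  match tail with
  | none => 0
  | some t => |t - v|

def bestGo : Nat → Option Int → List Int → Int → Int
  | 0, _, _, _ => 0   -- fuel exhausted: never reached (each level removes one value)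
  | fuel + 1, tail, vals, k =>
    if k = 0 then 0
    else (List.range vals.length).foldl
      (fun best (i : Nat) =>
        let v := vals[i]!
        let cand := edgeB tail v + bestGo fuel (some v) (vals.take i ++ vals.drop (i + 1)) (k - 1)
        if best < cand then cand else best) 0

def bestB (tail : Option Int) (vals : List Int) (k : Int) : Int :=
  bestGo (vals.length + 1) tail vals k

def diff_max_alt (arr : List Int) (vis : List Bool) (order : List Int) (cnt : Int) : Int :=
  if cnt = (arr.length : Int) then zipSumB order
  else
    let vals := freeValsB arr vis
    let k := (arr.length : Int) - cnt
    if k < 0 ∨ (vals.length : Int) < k then 0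
    else zipSumB order + bestB order.getLast? vals k

-- ===== PRECONDITION & SPEC =====
-- Pre_ is exactly where the Python A returns: with cnt ≠ len(arr) and vis shorter than arr,
-- A's loop reads vis[i] past the end and raises IndexError.
def Pre_diff_max (arr : List Int) (vis : List Bool) (order : List Int) (cnt : Int) : Prop :=
  cnt = (arr.length : Int) ∨ arr.length ≤ vis.length
instance (arr : List Int) (vis : List Bool) (order : List Int) (cnt : Int) : Decidable (Pre_diff_max arr vis order cnt) := by unfold Pre_diff_max; infer_instance

def pvWitness_diff_max : List Int × List Bool × List Int × Int := ([3, -1, 7], [false, false, false], [], 0)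

def Spec_diff_max (arr : List Int) (vis : List Bool) (order : List Int) (cnt : Int) (out : Int) : Prop := out = diff_max_alt arr vis order cnt
instance (arr : List Int) (vis : List Bool) (order : List Int) (cnt : Int) (out : Int) : Decidable (Spec_diff_max arr vis order cnt out) := by unfold Spec_diff_max; infer_instance

-- ===== CLAIM (what is proved, stated in full; the proofs are below) =====
def Claim_equal_diff_max : Prop := ∀ (arr : List Int) (vis : List Bool) (order : List Int) (cnt : Int), Dom_diff_max arr vis order cnt → Pre_diff_max arr vis order cnt → Spec_diff_max arr vis order cnt (diff_max arr vis order cnt)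

-- ===== LEMMAS AND PROOFS =====

-- the indices A's loop recurses on: the free positions of vis among arr's indices, in loop order
def freeIdxs (arr : List Int) (vis : List Bool) : List Nat :=
  (List.range arr.length).filter (fun (j : Nat) => decide (PySem.List.pyGet? vis ((j : Int)) = some false))

-- all ways to pick one element of a list, paired with the rest, in order
def splits : List Int → List (Int × List Int)
  | [] => []
  | v :: r => (v, r) :: (splits r).map (fun p => (p.1, v :: p.2))

theorem freeValsB_cons (a : Int) (ar : List Int) (b : Bool) (vr : List Bool) :
    freeValsB (a :: ar) (b :: vr) = if b then freeValsB ar vr else a :: freeValsB ar vr := by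
  cases b <;> simp [freeValsB]

theorem sumDiffA_eq (order : List Int) : sumDiffA order = zipSumB order := by
  unfold sumDiffA zipSumB
  rw [PySem.List.foldl_add, PySem.List.foldl_add, zero_add, zero_add]
  congr 1
  rw [PySem.List.pyRange_one, List.map_map]
  apply List.ext_getElem
  · simp only [List.length_map, List.length_range, List.length_zip, List.length_drop]
    omega
  · intro j h1 h2
    simp only [List.getElem_map, List.getElem_range, Function.comp_apply, List.getElem_zip]
    have hj1 : j + 1 < order.length := by
      simp only [List.length_map, List.length_zip, List.length_drop] at h2; omega
    have c1 : (0 : Int) + (j : Int) = ((j : Nat) : Int) := by ring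
    rw [c1]
    have c2 : ((j : Nat) : Int) + 1 = ((j + 1 : Nat) : Int) := by push_cast; ring
    rw [c2, PySem.List.pyGetD_natCast, PySem.List.pyGetD_natCast,
      List.getD_eq_getElem _ _ (by omega), List.getD_eq_getElem _ _ hj1]
    simp

theorem zipSumB_nonneg (order : List Int) : 0 ≤ zipSumB order := by
  unfold zipSumB
  rw [PySem.List.foldl_add, zero_add]
  apply List.sum_nonneg
  intro x hx
  obtain ⟨p, _, rfl⟩ := List.mem_map.mp hx
  exact abs_nonneg _

theorem edgeB_nonneg (tail : Option Int) (v : Int) : 0 ≤ edgeB tail v := by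
  cases tail <;> simp [edgeB]

theorem zipSumB_append (order : List Int) (v : Int) :
    zipSumB (order ++ [v]) = zipSumB order + edgeB order.getLast? v := by
  unfold zipSumB
  rw [PySem.List.foldl_add, PySem.List.foldl_add, zero_add, zero_add]
  induction order with
  | nil => simp [edgeB]
  | cons a rest ih =>
    cases rest with
    | nil => simp [edgeB]
    | cons b t =>
      have hz : ((a :: b :: t) ++ [v]).zip (((a :: b :: t) ++ [v]).drop 1)
          = (a, b) :: ((b :: t) ++ [v]).zip (((b :: t) ++ [v]).drop 1) := by
        simp
      rw [hz]
      simp only [List.map_cons, List.sum_cons]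
      rw [ih]
      have : (a :: b :: t).zip ((a :: b :: t).drop 1)
          = (a, b) :: (b :: t).zip ((b :: t).drop 1) := by simp
      rw [this]
      simp only [List.map_cons, List.sum_cons, List.getLast?_cons_cons]
      ring

theorem foldl_if_ge (g : Nat → Int) (l : List Nat) :
    ∀ acc : Int, acc ≤ l.foldl (fun b i => if b < g i then g i else b) acc := by
  induction l with
  | nil => intro acc; exact le_refl acc
  | cons x l ih =>
    intro acc
    rw [List.foldl_cons]
    refine le_trans ?_ (ih _)
    show acc ≤ if acc < g x then g x else acc
    split <;> omega

theorem bestGo_nonneg (fuel : Nat) (tail : Option Int) (vals : List Int) (k : Int) :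
    0 ≤ bestGo fuel tail vals k := by
  cases fuel with
  | zero => exact le_refl 0
  | succ fuel =>
    simp only [bestGo]
    split
    · exact le_refl 0
    · exact foldl_if_ge _ _ 0

theorem bestB_nonneg (tail : Option Int) (vals : List Int) (k : Int) : 0 ≤ bestB tail vals k :=
  bestGo_nonneg _ _ _ _

theorem if_lt_max (x y : Int) : (if x < y then y else x) = max x y := by
  split <;> omega

theorem pvTakeDropLen (l : List Int) (i : Nat) (h : i < l.length) :
    (l.take i ++ l.drop (i + 1)).length = l.length - 1 := by
  simp only [List.length_append, List.length_take, List.length_drop]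
  omega

theorem foldl_guard (P : Nat → Prop) [DecidablePred P] (f : Int → Nat → Int) (l : List Nat) :
    ∀ acc : Int, l.foldl (fun a j => if P j then f a j else a) acc
      = (l.filter (fun j => decide (P j))).foldl f acc := by
  induction l with
  | nil => intro acc; rfl
  | cons x l ih =>
    intro acc
    by_cases hx : P x <;> simp [hx, ih]

theorem range_map_splits (F : Int → List Int → Int) (vals : List Int) :
    (List.range vals.length).map (fun p => F vals[p]! (vals.take p ++ vals.drop (p + 1))) =
      (splits vals).map (fun pr => F pr.1 pr.2) := by
  induction vals generalizing F with
  | nil => simp [splits]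
  | cons v r ih =>
    simp only [List.length_cons, List.range_succ_eq_map, List.map_cons, List.map_map]
    have h0 : F (v :: r)[0]! ((v :: r).take 0 ++ (v :: r).drop 1) = F v r := by simp
    rw [h0]
    have hshift : (List.range r.length).map
        ((fun p => F (v :: r)[p]! ((v :: r).take p ++ (v :: r).drop (p + 1))) ∘ Nat.succ)
        = (List.range r.length).map (fun p => F r[p]! (v :: (r.take p ++ r.drop (p + 1)))) := by
      apply List.map_congr_left
      intro p _
      simp only [Function.comp_apply, Nat.succ_eq_add_one]
      rw [List.getElem!_cons_succ, List.take_succ_cons, List.drop_succ_cons]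
      simp
    rw [hshift, ih (fun x l => F x (v :: l))]
    simp only [splits, List.map_cons, List.map_map]
    rfl

theorem splits_ne_nil (v : Int) (r : List Int) : splits (v :: r) ≠ [] := by
  simp [splits]

theorem bestB_eq_fold (tail : Option Int) (vals : List Int) (k : Int) (hk : k ≠ 0) :
    bestB tail vals k =
      List.foldl max 0 ((splits vals).map (fun pr => edgeB tail pr.1 + bestB (some pr.1) pr.2 (k - 1))) := by
  rw [bestB]
  simp only [bestGo, if_neg hk]
  have hbody : (List.range vals.length).foldl
      (fun best i =>
        let v := vals[i]!
        let cand := edgeB tail v + bestGo vals.length (some v) (vals.take i ++ vals.drop (i + 1)) (k - 1)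
        if best < cand then cand else best) 0
      = (List.range vals.length).foldl
        (fun best i => max best (edgeB tail vals[i]! +
          bestB (some vals[i]!) (vals.take i ++ vals.drop (i + 1)) (k - 1))) 0 := by
    apply PySem.List.foldl_congr_mem
    intro acc i hi
    have hil : i < vals.length := List.mem_range.mp hi
    have hfuel : (vals.take i ++ vals.drop (i + 1)).length + 1 = vals.length := by
      rw [pvTakeDropLen vals i hil]; omega
    rw [bestB, hfuel]
    exact if_lt_max acc _
  rw [hbody, ← List.foldl_map, range_map_splits (fun v r => edgeB tail v + bestB (some v) r (k - 1)) vals]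

theorem mem_freeIdxs (arr : List Int) (vis : List Bool) (j : Nat) (hj : j ∈ freeIdxs arr vis) :
    j < arr.length ∧ PySem.List.pyGet? vis ((j : Int)) = some false := by
  have := List.mem_filter.mp hj
  refine ⟨List.mem_range.mp this.1, ?_⟩
  simpa using this.2

theorem freeVals_set_length (arr : List Int) :
    ∀ (vis : List Bool) (j : Nat), j < arr.length → arr.length ≤ vis.length →
      PySem.List.pyGet? vis ((j : Int)) = some false →
      (freeValsB arr (vis.set j true)).length + 1 = (freeValsB arr vis).length := by
  induction arr with
  | nil => intro vis j hj _ _; simp at hj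
  | cons a ar ih =>
    intro vis j hj hlen hv
    cases vis with
    | nil => simp at hlen
    | cons b vr =>
      cases j with
      | zero =>
        rw [PySem.List.pyGet?_natCast] at hv
        simp at hv
        subst hv
        simp [freeValsB_cons]
      | succ j' =>
        have hv' : PySem.List.pyGet? vr ((j' : Int)) = some false := by
          rw [PySem.List.pyGet?_natCast] at hv ⊢
          simpa using hv
        have := ih vr j' (by simpa using hj) (by simpa using hlen) hv'
        rw [List.set_cons_succ]
        rw [freeValsB_cons, freeValsB_cons]
        cases b <;> simp <;> omega

theorem freeVals_le_count (arr : List Int) :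
    ∀ vis : List Bool, (freeValsB arr vis).length ≤ vis.count false := by
  induction arr with
  | nil => intro vis; simp [freeValsB]
  | cons a ar ih =>
    intro vis
    cases vis with
    | nil => simp [freeValsB]
    | cons b vr =>
      rw [freeValsB_cons]
      have := ih vr
      cases b <;> simp only [List.count_cons] <;> simp <;> omega

theorem freeIdxs_cons (a : Int) (ar : List Int) (b : Bool) (vr : List Bool) :
    freeIdxs (a :: ar) (b :: vr)
      = (if b = false then [0] else []) ++ (freeIdxs ar vr).map Nat.succ := by
  unfold freeIdxs
  rw [List.length_cons, List.range_succ_eq_map, List.filter_cons, List.filter_map]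
  have hzero : (decide (PySem.List.pyGet? (b :: vr) (((0 : Nat) : Int)) = some false)) = (b = false : Bool) := by
    rw [PySem.List.pyGet?_natCast]
    cases b <;> simp
  have hpred : ((fun (j : Nat) => decide (PySem.List.pyGet? (b :: vr) ((j : Int)) = some false)) ∘ Nat.succ)
      = (fun (j : Nat) => decide (PySem.List.pyGet? vr ((j : Int)) = some false)) := by
    funext j
    simp [Nat.succ_eq_add_one]
  rw [hzero, hpred]
  cases b <;> simp

theorem freeIdxs_cons_false (a : Int) (ar : List Int) (vr : List Bool) :
    freeIdxs (a :: ar) (false :: vr) = 0 :: (freeIdxs ar vr).map Nat.succ := by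
  rw [freeIdxs_cons]
  simp

theorem freeIdxs_cons_true (a : Int) (ar : List Int) (vr : List Bool) :
    freeIdxs (a :: ar) (true :: vr) = (freeIdxs ar vr).map Nat.succ := by
  rw [freeIdxs_cons]
  simp

theorem freeIdxs_map_splits (F : Int → List Int → Int) (arr : List Int) :
    ∀ vis : List Bool, arr.length ≤ vis.length →
      (freeIdxs arr vis).map (fun j => F arr[j]! (freeValsB arr (vis.set j true))) =
        (splits (freeValsB arr vis)).map (fun pr => F pr.1 pr.2) := by
  induction arr generalizing F with
  | nil =>
    intro vis _
    simp [freeIdxs, freeValsB, splits]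
  | cons a ar ih =>
    intro vis hlen
    cases vis with
    | nil => simp at hlen
    | cons b vr =>
      have hvr : ar.length ≤ vr.length := by simpa using hlen
      cases b with
      | false =>
        rw [freeIdxs_cons_false]
        simp only [List.map_cons, List.map_map]
        have hterm0 : F (a :: ar)[0]! (freeValsB (a :: ar) ((false :: vr).set 0 true)) = F a (freeValsB ar vr) := by
          simp [freeValsB_cons]
        have htail : (freeIdxs ar vr).map
            ((fun j => F (a :: ar)[j]! (freeValsB (a :: ar) ((false :: vr).set j true))) ∘ Nat.succ)
            = (freeIdxs ar vr).map (fun j => F ar[j]! (a :: freeValsB ar (vr.set j true))) := by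
          apply List.map_congr_left
          intro j _
          simp [freeValsB_cons]
        rw [hterm0, htail, ih (fun x l => F x (a :: l)) vr hvr]
        rw [freeValsB_cons]
        simp only [if_neg (by simp : ¬ (false = true))]
        simp [splits, List.map_map]
      | true =>
        rw [freeIdxs_cons_true]
        rw [List.map_map]
        have htail : (freeIdxs ar vr).map
            ((fun j => F (a :: ar)[j]! (freeValsB (a :: ar) ((true :: vr).set j true))) ∘ Nat.succ)
            = (freeIdxs ar vr).map (fun j => F ar[j]! (freeValsB ar (vr.set j true))) := by
          apply List.map_congr_left
          intro j _
          simp [freeValsB_cons]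
        rw [htail, ih F vr hvr]
        rw [freeValsB_cons]
        simp

theorem foldl_max_zero (ts : List Int) (h : ∀ x ∈ ts, x = 0) :
    List.foldl max 0 ts = 0 := by
  induction ts with
  | nil => rfl
  | cons t ts ih =>
    have ht : t = 0 := h t (List.mem_cons_self ..)
    rw [List.foldl_cons, ht, max_self]
    exact ih (fun x hx => h x (List.mem_cons_of_mem _ hx))

theorem foldl_max_add_aux (c : Int) (ts : List Int) :
    ∀ a, List.foldl max (c + a) (ts.map (c + ·)) = c + List.foldl max a ts := by
  induction ts with
  | nil => intro a; rfl
  | cons t ts ih =>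
    intro a
    rw [List.map_cons, List.foldl_cons, List.foldl_cons, max_add_add_left, ih]

theorem foldl_max_add (c : Int) (hc : 0 ≤ c) (ts : List Int) (hne : ts ≠ [])
    (hpos : ∀ t ∈ ts, 0 ≤ t) :
    List.foldl max 0 (ts.map (c + ·)) = c + List.foldl max 0 ts := by
  cases ts with
  | nil => exact absurd rfl hne
  | cons t ts =>
    have ht : 0 ≤ t := hpos t (List.mem_cons_self ..)
    rw [List.map_cons, List.foldl_cons, List.foldl_cons]
    rw [max_eq_right (by omega : (0:Int) ≤ c + t), max_eq_right ht]
    exact foldl_max_add_aux c ts t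

theorem main_equiv (fuel : Nat) : ∀ (arr : List Int) (vis : List Bool) (order : List Int) (cnt : Int),
    (freeValsB arr vis).length < fuel → arr.length ≤ vis.length →
    diffGo fuel arr vis order cnt = diff_max_alt arr vis order cnt := by
  induction fuel with
  | zero => intro arr vis order cnt hm _; omega
  | succ fuel IH =>
  intro arr vis order cnt hm hlen
  by_cases hcnt : cnt = (arr.length : Int)
  · simp only [diffGo, diff_max_alt, if_pos hcnt, sumDiffA_eq]
  · simp only [diffGo, diff_max_alt, if_neg hcnt]
    rw [foldl_guard _ _ _ 0, ← List.foldl_map]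
    have hfid : (List.range arr.length).filter
        (fun (j : Nat) => decide (PySem.List.pyGet? vis ((j : Int)) = some false)) = freeIdxs arr vis := rfl
    rw [hfid]
    by_cases hlive : 1 ≤ (arr.length : Int) - cnt ∧ (arr.length : Int) - cnt ≤ ((freeValsB arr vis).length : Int)
    · -- live case: every child reaches the base after exactly (len - cnt) picks
      have hchild : ∀ j ∈ freeIdxs arr vis,
          diffGo fuel arr (vis.set j true) (order ++ [arr[j]!]) (cnt + 1)
            = zipSumB order + (edgeB order.getLast? arr[j]! +
                bestB (some arr[j]!) (freeValsB arr (vis.set j true)) ((arr.length : Int) - cnt - 1)) := by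
        intro j hj
        obtain ⟨hjl, hjv⟩ := mem_freeIdxs arr vis j hj
        have hlen1 : (freeValsB arr (vis.set j true)).length + 1 = (freeValsB arr vis).length :=
          freeVals_set_length arr vis j hjl hlen hjv
        rw [IH arr (vis.set j true) (order ++ [arr[j]!]) (cnt + 1) (by omega) (by simpa using hlen)]
        by_cases hbase : cnt + 1 = (arr.length : Int)
        · simp only [diff_max_alt, if_pos hbase]
          have hk1 : (arr.length : Int) - cnt - 1 = 0 := by omega
          rw [zipSumB_append, hk1]
          simp [bestB, bestGo]
        · simp only [diff_max_alt, if_neg hbase]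
          have hguard : ¬ ((arr.length : Int) - (cnt + 1) < 0 ∨
              ((freeValsB arr (vis.set j true)).length : Int) < (arr.length : Int) - (cnt + 1)) := by
            rw [not_or]
            exact ⟨by omega, by omega⟩
          rw [if_neg hguard, zipSumB_append, List.getLast?_concat]
          have : (arr.length : Int) - (cnt + 1) = (arr.length : Int) - cnt - 1 := by ring
          rw [this]
          ring
      rw [List.map_congr_left hchild]
      have hmapmap : (freeIdxs arr vis).map (fun j => zipSumB order +
            (edgeB order.getLast? arr[j]! +
              bestB (some arr[j]!) (freeValsB arr (vis.set j true)) ((arr.length : Int) - cnt - 1)))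
          = ((freeIdxs arr vis).map (fun j => edgeB order.getLast? arr[j]! +
              bestB (some arr[j]!) (freeValsB arr (vis.set j true)) ((arr.length : Int) - cnt - 1))).map
            (zipSumB order + ·) := by
        rw [List.map_map]; rfl
      rw [hmapmap,
        freeIdxs_map_splits (fun v r => edgeB order.getLast? v + bestB (some v) r ((arr.length : Int) - cnt - 1)) arr vis hlen]
      have hguard : ¬ ((arr.length : Int) - cnt < 0 ∨
          ((freeValsB arr vis).length : Int) < (arr.length : Int) - cnt) := by
        rw [not_or]
        exact ⟨by omega, by omega⟩
      rw [if_neg hguard]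
      have hfvne : freeValsB arr vis ≠ [] := by
        intro hnil
        rw [hnil] at hlive
        simp at hlive
        omega
      rw [foldl_max_add (zipSumB order) (zipSumB_nonneg order) _
        (by
          intro hnil
          rw [List.map_eq_nil_iff] at hnil
          cases hfv : freeValsB arr vis with
          | nil => exact hfvne hfv
          | cons v r => rw [hfv] at hnil; exact splits_ne_nil v r hnil)
        (by
          intro t ht
          obtain ⟨pr, _, rfl⟩ := List.mem_map.mp ht
          exact add_nonneg (edgeB_nonneg _ _) (bestB_nonneg _ _ _))]
      rw [← bestB_eq_fold order.getLast? (freeValsB arr vis) ((arr.length : Int) - cnt) (by omega)]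
    · -- dead case: no child can reach the base, both sides give 0
      have hguard : ((arr.length : Int) - cnt < 0 ∨
          ((freeValsB arr vis).length : Int) < (arr.length : Int) - cnt) := by omega
      rw [if_pos hguard]
      apply foldl_max_zero
      intro x hx
      obtain ⟨j, hj, rfl⟩ := List.mem_map.mp hx
      obtain ⟨hjl, hjv⟩ := mem_freeIdxs arr vis j hj
      have hlen1 : (freeValsB arr (vis.set j true)).length + 1 = (freeValsB arr vis).length :=
        freeVals_set_length arr vis j hjl hlen hjv
      rw [IH arr (vis.set j true) (order ++ [arr[j]!]) (cnt + 1) (by omega) (by simpa using hlen)]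
      have hbase : cnt + 1 ≠ (arr.length : Int) := by omega
      simp only [diff_max_alt, if_neg hbase]
      rw [if_pos (by omega)]

-- ===== VERDICT (by name: the statement is the Claim_ definition above) =====
theorem diff_max_spec : Claim_equal_diff_max := by
  intro arr vis order cnt _ hpre
  unfold Spec_diff_max diff_max
  rcases hpre with h | h
  · simp only [diffGo, diff_max_alt, if_pos h, sumDiffA_eq]
  · exact main_equiv (vis.count false + 1) arr vis order cnt
      (by have := freeVals_le_count arr vis; omega) h
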